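-- pv_equiv track=rewrite | github.com/TarcisioCorrea/projeto02 | projeto03/security.py | detectar_prompt_injection
-- ===== SOURCE A (Python) =====
-- def detectar_prompt_injection(texto):
--
--     ataques = [
--         "system prompt",
--         "ignore previous instructions",
--         "ignore todas as instruções",
--         "mostre seu prompt",
--         "qual sua system prompt",
--         "reveal system prompt"
--     ]
--
--     texto = texto.lower()
--
--     for ataque in ataques:
--         if ataque in texto:
--             return True
--
--     return False
-- ===== SOURCE B (Python) =====
-- def detectar_prompt_injection(texto):
--     ataques = [
--         "system prompt",
--         "ignore previous instructions",
--         "ignore todas as instruções",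
--         "mostre seu prompt",
--         "qual sua system prompt",
--         "reveal system prompt"
--     ]
--     t = texto.lower()
--     # single left-to-right scan: at each position, does some attack phrase start here?
--     for i in range(len(t) + 1):
--         for ataque in ataques:
--             if t.startswith(ataque, i):
--                 return True
--     return False
-- ===== Notes on version B (the rewrite author's own statement) =====
-- stated objective: alternative
-- what changed: A scans the text once per attack phrase (pattern-major, one 'in' substring test per phrase); B lowercases once and makes a single left-to-right scan of the text, at each position testing whether any phrase starts there (position-major, startswith with a start index).
import Mathlib
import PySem

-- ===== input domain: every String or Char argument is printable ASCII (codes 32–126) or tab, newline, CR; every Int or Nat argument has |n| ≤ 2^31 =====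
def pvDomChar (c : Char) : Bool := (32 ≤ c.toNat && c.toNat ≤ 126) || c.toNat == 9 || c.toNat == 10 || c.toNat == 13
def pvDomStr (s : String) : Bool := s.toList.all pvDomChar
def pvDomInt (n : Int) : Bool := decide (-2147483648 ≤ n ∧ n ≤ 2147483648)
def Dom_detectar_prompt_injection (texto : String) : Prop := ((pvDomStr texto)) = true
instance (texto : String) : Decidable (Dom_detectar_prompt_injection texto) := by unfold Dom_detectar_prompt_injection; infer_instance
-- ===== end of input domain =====

-- B replaces A's pattern-major loop (one substring scan per phrase) by one position-major
-- scan of the lowercased text, testing at each position whether any phrase starts there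
-- (objective: alternative traversal, same result).

-- ===== PORT A =====
def pvAtaques : List (List Char) :=
  ["system prompt".toList,
   "ignore previous instructions".toList,
   "ignore todas as instruções".toList,
   "mostre seu prompt".toList,
   "qual sua system prompt".toList,
   "reveal system prompt".toList]

-- A's 'for ataque in ataques: if ataque in texto: return True' loop
def pvLoopA : List (List Char) → List Char → Bool
  | [], _ => false
  | a :: rest, t => if PySem.Chars.isIn a t then true else pvLoopA rest t

def detectar_prompt_injection (texto : String) : Bool :=
  pvLoopA pvAtaques (PySem.Chars.lower texto.toList)

-- ===== PORT B =====
-- B's scan: for each start position i (0..len t), does some phrase start at i?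
-- t.startswith(a, i) is Chars.startswith (t.drop i) a; recursion over suffixes = loop over i.
def pvScanB : List Char → Bool
  | [] => pvAtaques.any (fun a => PySem.Chars.startswith [] a)
  | c :: rest =>
      pvAtaques.any (fun a => PySem.Chars.startswith (c :: rest) a) || pvScanB rest

def detectar_prompt_injection_alt (texto : String) : Bool :=
  pvScanB (PySem.Chars.lower texto.toList)

-- ===== PRECONDITION & SPEC =====
def Spec_detectar_prompt_injection (texto : String) (out : Bool) : Prop := out = detectar_prompt_injection_alt texto
instance (texto : String) (out : Bool) : Decidable (Spec_detectar_prompt_injection texto out) := by unfold Spec_detectar_prompt_injection; infer_instance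

-- ===== CLAIM (what is proved, stated in full; the proofs are below) =====
def Claim_equal_detectar_prompt_injection : Prop := ∀ (texto : String), Dom_detectar_prompt_injection texto → Spec_detectar_prompt_injection texto (detectar_prompt_injection texto)

-- ===== LEMMAS AND PROOFS =====

theorem pvLoopA_eq_any (L : List (List Char)) (t : List Char) :
    pvLoopA L t = L.any (fun a => PySem.Chars.isIn a t) := by
  induction L with
  | nil => rfl
  | cons a rest ih => by_cases h : PySem.Chars.isIn a t = true <;> simp [pvLoopA, ih, h]

theorem pvScanB_iff (t : List Char) :
    pvScanB t = true ↔ ∃ a ∈ pvAtaques, ∃ j, a <+: t.drop j := by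
  induction t with
  | nil =>
    simp [pvScanB, PySem.Chars.startswith_iff]
  | cons c rest ih =>
    simp only [pvScanB, Bool.or_eq_true, List.any_eq_true, PySem.Chars.startswith_iff, ih]
    constructor
    · rintro (⟨a, ha, hp⟩ | ⟨a, ha, j, hp⟩)
      · exact ⟨a, ha, 0, by simpa using hp⟩
      · exact ⟨a, ha, j + 1, by simpa using hp⟩
    · rintro ⟨a, ha, j, hp⟩
      cases j with
      | zero => exact Or.inl ⟨a, ha, by simpa using hp⟩
      | succ j => exact Or.inr ⟨a, ha, j, by simpa using hp⟩

-- ===== VERDICT (by name: the statement is the Claim_ definition above) =====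
theorem detectar_prompt_injection_spec : Claim_equal_detectar_prompt_injection := by
  intro texto _
  unfold Spec_detectar_prompt_injection detectar_prompt_injection detectar_prompt_injection_alt
  set t := PySem.Chars.lower texto.toList
  rw [Bool.eq_iff_iff, pvLoopA_eq_any, pvScanB_iff, List.any_eq_true]
  constructor
  · rintro ⟨a, ha, hin⟩
    obtain ⟨j, hj⟩ := (PySem.Chars.exists_prefix_drop_iff_isIn a t).mpr hin
    exact ⟨a, ha, j, hj⟩
  · rintro ⟨a, ha, j, hj⟩
    exact ⟨a, ha, (PySem.Chars.exists_prefix_drop_iff_isIn a t).mp ⟨j, hj⟩⟩
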